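-- pv_equiv track=rewrite | github.com/kingFrederic355/CyS | Tarea02/CribaCuadratica/shanks.py | quad_residue
-- ===== SOURCE A (Python) =====
-- def quad_residue(a,n):
--     l=1
--     q=(n-1)//2
--     x = q**l
--     if x==0:
--         return 1
--
--     a =a%n
--     z=1
--     while x!= 0:
--         if x%2==0:
--             a=(a **2) % n
--             x//= 2
--         else:
--             x-=1
--             z=(z*a) % n
--
--     return z
-- ===== SOURCE B (Python) =====
-- def _pow(base, e, n):
--     if e == 0:
--         return 1
--     if e % 2 == 0:
--         return _pow((base * base) % n, e // 2, n)
--     return (base * _pow(base, e - 1, n)) % n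
--
-- def quad_residue(a, n):
--     q = (n - 1) // 2
--     if q == 0:
--         return 1
--     return _pow(a % n, q, n)
-- ===== Notes on version B (the rewrite author's own statement) =====
-- stated objective: alternative
-- what changed: Replaces A's flat while-loop with mutable a/x/z state by a recursive divide-and-conquer modular exponentiation helper; same square-and-multiply cost. Pre_ excludes n <= 0, where A raises ZeroDivisionError (n = 0) or loops forever (n < 0).
import Mathlib
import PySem

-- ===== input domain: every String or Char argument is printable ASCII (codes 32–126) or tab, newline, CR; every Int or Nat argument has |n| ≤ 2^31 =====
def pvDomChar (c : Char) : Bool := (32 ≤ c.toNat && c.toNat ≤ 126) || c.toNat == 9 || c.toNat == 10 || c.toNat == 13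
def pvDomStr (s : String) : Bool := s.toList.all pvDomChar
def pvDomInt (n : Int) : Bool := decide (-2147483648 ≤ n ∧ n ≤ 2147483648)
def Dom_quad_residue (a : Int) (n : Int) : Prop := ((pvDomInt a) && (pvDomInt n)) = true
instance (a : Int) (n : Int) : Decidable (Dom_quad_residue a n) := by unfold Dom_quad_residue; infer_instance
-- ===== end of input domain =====

-- B replaces A's flat while-loop square-and-multiply by a recursive divide-and-conquer
-- modular exponentiation (alternative decomposition, same cost); return values only.


-- ===== PORT A =====
-- A's while loop; the 'x ≤ 0 → z' guard only totalises it (Python diverges for x < 0,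
-- excluded by Pre_; x = 0 is Python's loop exit returning z).
def quadLoopA (n a z x : Int) : Int :=
  if _h : x ≤ 0 then z
  else if PySem.Int.mod x 2 = 0 then
    quadLoopA n (PySem.Int.mod (a ^ 2) n) z (PySem.Int.floordiv x 2)
  else
    quadLoopA n a (PySem.Int.mod (z * a) n) (x - 1)
termination_by x.toNat
decreasing_by
  · rw [PySem.Int.floordiv_eq_ediv_of_pos (by omega)]; omega
  · omega

def quad_residue (a : Int) (n : Int) : Int :=
  let l : Int := 1
  let q := PySem.Int.floordiv (n - 1) 2
  let x := q ^ l.toNat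
  if x = 0 then 1
  else quadLoopA n (PySem.Int.mod a n) 1 x

-- ===== PORT B =====
-- recursive helper _pow; the 'e ≤ 0 → 1' guard totalises it (Python returns 1 at e = 0,
-- and e < 0 is never reached from quad_residue_alt inside Pre_).
def powB (base e n : Int) : Int :=
  if _h : e ≤ 0 then 1
  else if PySem.Int.mod e 2 = 0 then
    powB (PySem.Int.mod (base * base) n) (PySem.Int.floordiv e 2) n
  else
    PySem.Int.mod (base * powB base (e - 1) n) n
termination_by e.toNat
decreasing_by
  · rw [PySem.Int.floordiv_eq_ediv_of_pos (by omega)]; omega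
  · omega

def quad_residue_alt (a : Int) (n : Int) : Int :=
  let q := PySem.Int.floordiv (n - 1) 2
  if q = 0 then 1
  else powB (PySem.Int.mod a n) q n

-- ===== PRECONDITION & SPEC =====
-- Pre_ excludes n ≤ 0: there Python A raises ZeroDivisionError (n = 0, 'a % n')
-- or loops forever (n < 0, x negative).
def Pre_quad_residue (a : Int) (n : Int) : Prop := 1 ≤ n
instance (a : Int) (n : Int) : Decidable (Pre_quad_residue a n) := by unfold Pre_quad_residue; infer_instance
def pvWitness_quad_residue : Int × Int := (2, 7)

def Spec_quad_residue (a : Int) (n : Int) (out : Int) : Prop := out = quad_residue_alt a n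
instance (a : Int) (n : Int) (out : Int) : Decidable (Spec_quad_residue a n out) := by unfold Spec_quad_residue; infer_instance

-- ===== CLAIM (what is proved, stated in full; the proofs are below) =====
def Claim_equal_quad_residue : Prop := ∀ (a : Int) (n : Int), Dom_quad_residue a n → Pre_quad_residue a n → Spec_quad_residue a n (quad_residue a n)

-- ===== LEMMAS AND PROOFS =====
theorem mulmod_left (x y n : Int) : (x % n * y) % n = (x * y) % n := by
  rw [Int.mul_emod, Int.emod_emod_of_dvd _ dvd_rfl, ← Int.mul_emod]

theorem mulmod_right (x y n : Int) : (x * (y % n)) % n = (x * y) % n := by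
  rw [Int.mul_emod, Int.emod_emod_of_dvd _ dvd_rfl, ← Int.mul_emod]

-- powB lands in reduced form for e ≥ 1
theorem powB_mod (n : Int) (hn : 0 < n) :
    ∀ (k : Nat) (e b : Int), e.toNat ≤ k → 1 ≤ e → powB b e n % n = powB b e n := by
  intro k
  induction k with
  | zero => intro e b hk he; omega
  | succ k ih =>
    intro e b hk he
    have hneg : ¬ e ≤ 0 := by omega
    have hm : PySem.Int.mod e 2 = e % 2 := PySem.Int.mod_eq_emod_of_pos (by omega)
    have hd : PySem.Int.floordiv e 2 = e / 2 := PySem.Int.floordiv_eq_ediv_of_pos (by omega)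
    have hmn : ∀ y : Int, PySem.Int.mod y n = y % n :=
      fun y => PySem.Int.mod_eq_emod_of_pos hn
    rw [powB]
    simp only [hneg, dite_false, hm, hd, hmn]
    by_cases hev : e % 2 = 0
    · simp only [hev, if_true]
      exact ih (e / 2) _ (by omega) (by omega)
    · simp only [hev, if_false]
      exact Int.emod_emod_of_dvd _ dvd_rfl

-- loop ↔ recursion invariant
theorem quadLoopA_eq_powB (n : Int) (hn : 0 < n) :
    ∀ (k : Nat) (x a z : Int), x.toNat ≤ k → 1 ≤ x →
      quadLoopA n a z x = (z * powB a x n) % n := by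
  intro k
  induction k with
  | zero => intro x a z hk hx; omega
  | succ k ih =>
    intro x a z hk hx
    have hneg : ¬ x ≤ 0 := by omega
    have hm : PySem.Int.mod x 2 = x % 2 := PySem.Int.mod_eq_emod_of_pos (by omega)
    have hd : PySem.Int.floordiv x 2 = x / 2 := PySem.Int.floordiv_eq_ediv_of_pos (by omega)
    have hmn : ∀ y : Int, PySem.Int.mod y n = y % n :=
      fun y => PySem.Int.mod_eq_emod_of_pos hn
    rw [quadLoopA, powB]
    simp only [hneg, dite_false, hm, hd, hmn]
    by_cases hev : x % 2 = 0
    · -- even: both recurse on x / 2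
      simp only [hev, if_true]
      have h2 : 1 ≤ x / 2 := by omega
      rw [ih (x / 2) _ _ (by omega) h2, sq]
    · -- odd: loop takes one multiply step
      simp only [hev, if_false]
      by_cases h1 : x = 1
      · subst h1
        rw [quadLoopA]
        simp only [show (1 : Int) - 1 ≤ 0 by norm_num, dite_true]
        rw [powB]
        simp only [show (1 : Int) - 1 ≤ 0 by norm_num, dite_true, mul_one, mulmod_right]
      · have hx1 : 1 ≤ x - 1 := by omega
        rw [ih (x - 1) _ _ (by omega) hx1, mulmod_left, mulmod_right, mul_assoc]

-- ===== VERDICT (by name: the statement is the Claim_ definition above) =====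
theorem quad_residue_spec : Claim_equal_quad_residue := by
  intro a n _ hpre
  unfold Spec_quad_residue quad_residue quad_residue_alt
  have hn : (0 : Int) < n := hpre
  have hq : PySem.Int.floordiv (n - 1) 2 = (n - 1) / 2 :=
    PySem.Int.floordiv_eq_ediv_of_pos (by omega)
  simp only [hq, Int.toNat_one, pow_one]
  by_cases h0 : (n - 1) / 2 = 0
  · simp [h0]
  · have hq1 : 1 ≤ (n - 1) / 2 := by
      have : 0 ≤ (n - 1) / 2 := Int.ediv_nonneg (by omega) (by omega)
      omega
    simp only [h0, if_false]
    rw [quadLoopA_eq_powB n hn ((n - 1) / 2).toNat _ _ _ le_rfl hq1, one_mul,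
      powB_mod n hn ((n - 1) / 2).toNat _ _ le_rfl hq1]
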